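-- pv_equiv track=rewrite | github.com/eliottcassidy2000/math | 04-computation/omega_graph_structure.py | build_omega_graph
-- ===== SOURCE A (Python) =====
-- def build_omega_graph(cycle_vsets):
--     """Build the odd-cycle intersection graph: vertices = cycles,
--     edges = pairs sharing a vertex."""
--     n = len(cycle_vsets)
--     adj = [[False]*n for _ in range(n)]
--     for i in range(n):
--         for j in range(i+1, n):
--             if cycle_vsets[i] & cycle_vsets[j]:
--                 adj[i][j] = adj[j][i] = True
--     return adj
-- ===== SOURCE B (Python) =====
-- def build_omega_graph(cycle_vsets):
--     """Inverted index vertex -> cycle ids; mark every pair of cycles listed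
--     under a common vertex instead of intersecting every pair of sets."""
--     n = len(cycle_vsets)
--     index = {}
--     for i, s in enumerate(cycle_vsets):
--         for v in s:
--             index.setdefault(v, []).append(i)
--     adj = [[False] * n for _ in range(n)]
--     for idxs in index.values():
--         m = len(idxs)
--         for a in range(m):
--             for b in range(a + 1, m):
--                 i, j = idxs[a], idxs[b]
--                 adj[i][j] = adj[j][i] = True
--     return adj
-- ===== Notes on version B (the rewrite author's own statement) =====
-- stated objective: faster
-- what changed: Replaces the all-pairs set-intersection test with an inverted index vertex->cycle ids, marking only the pairs of cycles that actually share a vertex.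
import Mathlib
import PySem

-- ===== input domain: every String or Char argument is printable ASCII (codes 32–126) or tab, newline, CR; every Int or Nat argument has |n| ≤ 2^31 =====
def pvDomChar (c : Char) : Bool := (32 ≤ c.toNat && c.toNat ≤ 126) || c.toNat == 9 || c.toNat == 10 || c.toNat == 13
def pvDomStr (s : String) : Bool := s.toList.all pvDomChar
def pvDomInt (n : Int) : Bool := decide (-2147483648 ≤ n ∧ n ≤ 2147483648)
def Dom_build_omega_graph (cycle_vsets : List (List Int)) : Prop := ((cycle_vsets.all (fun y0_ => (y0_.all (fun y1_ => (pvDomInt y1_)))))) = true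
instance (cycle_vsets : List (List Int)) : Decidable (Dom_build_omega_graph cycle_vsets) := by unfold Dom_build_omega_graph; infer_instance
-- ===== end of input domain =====

-- B replaces the all-pairs set-intersection scan by an inverted index vertex -> cycle ids,
-- marking only pairs of cycles that actually share a vertex (objective: faster).


-- `adj[i][j] = adj[j][i] = True` (both Pythons write exactly this pair of in-place stores)
def pvMark (m : List (List Bool)) (i j : Nat) : List (List Bool) :=
  (m.modify i (fun r => r.set j true)).modify j (fun r => r.set i true)

-- ===== PORT A =====
-- `range(i+1, n)` over nonnegative Nat bounds is `List.range' (i+1) (n-(i+1))` (exact here);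
-- `cycle_vsets[i] & cycle_vsets[j]` is truthy iff the two sets share an element.
def build_omega_graph (cycle_vsets : List (List Int)) : List (List Bool) :=
  let n := cycle_vsets.length
  let adj := List.replicate n (List.replicate n false)
  (List.range n).foldl (fun adj i =>
    (List.range' (i+1) (n - (i+1))).foldl (fun adj j =>
      if (cycle_vsets.getD i []).any (fun v => (cycle_vsets.getD j []).contains v) then
        pvMark adj i j
      else adj) adj) adj

-- ===== PORT B =====
-- `index.setdefault(v, []).append(i)` is `d.modify v [] (· ++ [i])` (insert-at-end if absent,
-- append in place if present — PySem.Dict keeps Python's insertion order).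
def pvIndex (cycle_vsets : List (List Int)) : PySem.Dict Int (List Nat) :=
  cycle_vsets.zipIdx.foldl
    (fun d p => p.1.foldl (fun d v => d.modify v [] (· ++ [p.2])) d)
    PySem.Dict.empty

def build_omega_graph_alt (cycle_vsets : List (List Int)) : List (List Bool) :=
  let n := cycle_vsets.length
  let index := pvIndex cycle_vsets
  let adj := List.replicate n (List.replicate n false)
  index.values.foldl (fun adj idxs =>
    (List.range idxs.length).foldl (fun adj a =>
      (List.range' (a+1) (idxs.length - (a+1))).foldl (fun adj b =>
        pvMark adj (idxs.getD a 0) (idxs.getD b 0)) adj) adj) adj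

-- ===== PRECONDITION & SPEC =====
-- The Python parameter is a list of SETS of ints; an inner List Int encodes a set, so its
-- elements are distinct. Pre_ states exactly that (no Python input is excluded).
def Pre_build_omega_graph (cycle_vsets : List (List Int)) : Prop :=
  ∀ s ∈ cycle_vsets, s.Nodup
instance (cycle_vsets : List (List Int)) : Decidable (Pre_build_omega_graph cycle_vsets) := by
  unfold Pre_build_omega_graph; infer_instance

def pvWitness_build_omega_graph : List (List Int) := [[1, 2], [2, 3], [4]]

def Spec_build_omega_graph (cycle_vsets : List (List Int)) (out : List (List Bool)) : Prop :=
  out = build_omega_graph_alt cycle_vsets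
instance (cycle_vsets : List (List Int)) (out : List (List Bool)) : Decidable (Spec_build_omega_graph cycle_vsets out) := by
  unfold Spec_build_omega_graph; infer_instance

-- ===== CLAIM (what is proved, stated in full; the proofs are below) =====
def Claim_equal_build_omega_graph : Prop :=
  ∀ (cycle_vsets : List (List Int)), Dom_build_omega_graph cycle_vsets →
    Pre_build_omega_graph cycle_vsets →
    Spec_build_omega_graph cycle_vsets (build_omega_graph cycle_vsets)

-- ===== LEMMAS AND PROOFS =====

-- matrix entry and the list of marked cells
def pvEnt (m : List (List Bool)) (i j : Nat) : Bool := (m.getD i []).getD j false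

def pvMarks (ps : List (Nat × Nat)) (m : List (List Bool)) : List (List Bool) :=
  ps.foldl (fun m p => pvMark m p.1 p.2) m

def pvShaped (n : Nat) (m : List (List Bool)) : Prop :=
  m.length = n ∧ ∀ i, i < n → (m.getD i []).length = n

-- the flat lists of cells each port marks
def pvPA (cs : List (List Int)) : List (Nat × Nat) :=
  (List.range cs.length).flatMap (fun i =>
    ((List.range' (i+1) (cs.length - (i+1))).filter
        (fun j => (cs.getD i []).any (fun v => (cs.getD j []).contains v))).map (fun j => (i, j)))

def pvPB (cs : List (List Int)) : List (Nat × Nat) :=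
  (pvIndex cs).values.flatMap (fun idxs =>
    (List.range idxs.length).flatMap (fun a =>
      (List.range' (a+1) (idxs.length - (a+1))).map (fun b => (idxs.getD a 0, idxs.getD b 0))))

theorem pv_foldl_if_mark (l : List Nat) (c : Nat → Bool) (g : Nat → Nat × Nat)
    (m : List (List Bool)) :
    l.foldl (fun m j => if c j then pvMark m (g j).1 (g j).2 else m) m
      = pvMarks ((l.filter c).map g) m := by
  induction l generalizing m with
  | nil => rfl
  | cons x xs ih => by_cases h : c x <;> simp [pvMarks, h, ih]
theorem pv_marks_append (ps qs : List (Nat × Nat)) (m : List (List Bool)) :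
    pvMarks (ps ++ qs) m = pvMarks qs (pvMarks ps m) := by
  simp [pvMarks, List.foldl_append]
theorem pv_foldl_marks_flatMap {α : Type} (l : List α) (P : α → List (Nat × Nat))
    (m : List (List Bool)) :
    l.foldl (fun m x => pvMarks (P x) m) m = pvMarks (l.flatMap P) m := by
  induction l generalizing m with
  | nil => rfl
  | cons x xs ih => simp [List.flatMap_cons, pv_marks_append, ih]
theorem pv_A_eq_marks (cs : List (List Int)) :
    build_omega_graph cs
      = pvMarks (pvPA cs) (List.replicate cs.length (List.replicate cs.length false)) := by
  show (List.range cs.length).foldl _ _ = _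
  have h : (fun (adj : List (List Bool)) (i : Nat) =>
      (List.range' (i+1) (cs.length - (i+1))).foldl (fun adj j =>
        if (cs.getD i []).any (fun v => (cs.getD j []).contains v) then
          pvMark adj i j
        else adj) adj)
      = fun adj i => pvMarks
          (((List.range' (i+1) (cs.length - (i+1))).filter
              (fun j => (cs.getD i []).any (fun v => (cs.getD j []).contains v))).map
            (fun j => (i, j))) adj := by
    funext adj i
    exact pv_foldl_if_mark _ _ (fun j => (i, j)) adj
  rw [h, pv_foldl_marks_flatMap]
  rfl
theorem pv_foldl_mark_map {α : Type} (l : List α) (g : α → Nat × Nat) (m : List (List Bool)) :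
    l.foldl (fun m x => pvMark m (g x).1 (g x).2) m = pvMarks (l.map g) m := by
  induction l generalizing m with
  | nil => rfl
  | cons x xs ih => simp [pvMarks, ih]
theorem pv_B_eq_marks (cs : List (List Int)) :
    build_omega_graph_alt cs
      = pvMarks (pvPB cs) (List.replicate cs.length (List.replicate cs.length false)) := by
  show (pvIndex cs).values.foldl _ _ = _
  have h : (fun (adj : List (List Bool)) (idxs : List Nat) =>
      (List.range idxs.length).foldl (fun adj a =>
        (List.range' (a+1) (idxs.length - (a+1))).foldl (fun adj b =>
          pvMark adj (idxs.getD a 0) (idxs.getD b 0)) adj) adj)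
      = fun adj idxs => pvMarks
          ((List.range idxs.length).flatMap (fun a =>
            (List.range' (a+1) (idxs.length - (a+1))).map
              (fun b => (idxs.getD a 0, idxs.getD b 0)))) adj := by
    funext adj idxs
    have h2 : (fun (adj : List (List Bool)) (a : Nat) =>
        (List.range' (a+1) (idxs.length - (a+1))).foldl (fun adj b =>
          pvMark adj (idxs.getD a 0) (idxs.getD b 0)) adj)
        = fun adj a => pvMarks
            ((List.range' (a+1) (idxs.length - (a+1))).map
              (fun b => (idxs.getD a 0, idxs.getD b 0))) adj := by
      funext adj a
      exact pv_foldl_mark_map _ (fun b => (idxs.getD a 0, idxs.getD b 0)) adj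
    rw [h2, pv_foldl_marks_flatMap]
  rw [h, pv_foldl_marks_flatMap]
  rfl

theorem pv_shaped_mark {n : Nat} {m : List (List Bool)} (h : pvShaped n m) (a b : Nat) :
    pvShaped n (pvMark m a b) := by
  obtain ⟨h1, h2⟩ := h
  refine ⟨by simp [pvMark, h1], fun i hi => ?_⟩
  simp only [pvMark, List.getD_eq_getElem?_getD, List.getElem?_modify]
  have := h2 i hi
  simp only [List.getD_eq_getElem?_getD] at this
  cases hm : m[i]? with
  | none => simp [hm] at this ⊢; omega
  | some r =>
    simp [hm] at this ⊢
    split_ifs <;> simp [this]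

theorem pv_ent_mark {n : Nat} {m : List (List Bool)} (h : pvShaped n m)
    {a b : Nat} (ha : a < n) (hb : b < n) (i j : Nat) :
    pvEnt (pvMark m a b) i j
      = if (a = i ∧ b = j) ∨ (a = j ∧ b = i) then true else pvEnt m i j := by
  obtain ⟨h1, h2⟩ := h
  simp only [pvEnt, pvMark, List.getD_eq_getElem?_getD, List.getElem?_modify]
  cases hm : m[i]? with
  | none =>
    have : ¬ i < m.length := by simpa [List.getElem?_eq_none_iff] using hm
    have hia : i ≠ a := by omega
    have hib : i ≠ b := by omega
    simp [Ne.symm hia, Ne.symm hib]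
  | some r =>
    have hil : i < m.length := (List.getElem?_eq_some_iff.mp hm).1
    have hr : r.length = n := by
      have := h2 i (by omega)
      simp [List.getD_eq_getElem?_getD, hm] at this; exact this
    have ha' : a < r.length := hr ▸ ha
    have hb' : b < r.length := hr ▸ hb
    by_cases hia : i = a <;> by_cases hib : i = b <;>
      simp [hia, hib, List.getElem?_set] <;>
      by_cases hja : j = a <;> by_cases hjb : j = b <;>
      (try subst hia) <;> (try subst hib) <;> (try subst hja) <;> (try subst hjb) <;>
      simp_all [eq_comm]
theorem pv_shaped_marks {n : Nat} {m : List (List Bool)} (h : pvShaped n m)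
    (ps : List (Nat × Nat)) : pvShaped n (pvMarks ps m) := by
  induction ps generalizing m with
  | nil => exact h
  | cons p ps ih => exact ih (pv_shaped_mark h p.1 p.2)

theorem pv_ent_marks {n : Nat} {m : List (List Bool)} (h : pvShaped n m)
    (ps : List (Nat × Nat)) (hp : ∀ p ∈ ps, p.1 < n ∧ p.2 < n) (i j : Nat) :
    pvEnt (pvMarks ps m) i j
      = (ps.any (fun p => decide ((p.1 = i ∧ p.2 = j) ∨ (p.1 = j ∧ p.2 = i)))
          || pvEnt m i j) := by
  induction ps generalizing m with
  | nil => simp [pvMarks]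
  | cons p ps ih =>
    have hp1 := hp p (List.mem_cons_self)
    have step : pvEnt (pvMarks (p :: ps) m) i j
        = pvEnt (pvMarks ps (pvMark m p.1 p.2)) i j := rfl
    rw [step, ih (pv_shaped_mark h p.1 p.2) (fun q hq => hp q (List.mem_cons_of_mem _ hq)),
        pv_ent_mark h hp1.1 hp1.2 i j]
    by_cases hc : (p.1 = i ∧ p.2 = j) ∨ (p.1 = j ∧ p.2 = i)
    · rcases hc with ⟨h1, h2⟩ | ⟨h1, h2⟩ <;> subst h1 <;> subst h2 <;> simp
    · have n1 : ¬(p.1 = i ∧ p.2 = j) := fun hx => hc (Or.inl hx)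
      have n2 : ¬(p.1 = j ∧ p.2 = i) := fun hx => hc (Or.inr hx)
      simp [-Bool.decide_and, n1, n2]

theorem pv_shaped_init (n : Nat) : pvShaped n (List.replicate n (List.replicate n false)) := by
  refine ⟨by simp, fun i hi => ?_⟩
  simp [List.getD_eq_getElem?_getD, hi]

theorem pv_foldl_foldl_flatMap {α β δ : Type} (xs : List α) (g : α → List β)
    (step : δ → β → δ) (d : δ) :
    xs.foldl (fun d x => (g x).foldl step d) d = (xs.flatMap g).foldl step d := by
  induction xs generalizing d with
  | nil => rfl
  | cons x xs ih => simp [List.flatMap_cons, List.foldl_append, ih]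

-- s.filter (· == v) for a Nodup s
theorem pv_filter_beq_nodup (s : List Int) (h : s.Nodup) (v : Int) :
    s.filter (· == v) = if v ∈ s then [v] else [] := by
  rw [List.filter_beq]
  rcases Classical.em (v ∈ s) with hm | hm
  · simp [hm, List.count_eq_one_of_mem h hm]
  · simp [hm, List.count_eq_zero_of_not_mem hm]

theorem pv_filter_map_eq_flatMap {α β : Type} (l : List α) (c : α → Bool) (f : α → β) :
    (l.filter c).map f = l.flatMap (fun x => if c x then [f x] else []) := by
  induction l with
  | nil => rfl
  | cons x xs ih => by_cases hx : c x <;> simp [hx, ih]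

theorem pv_index_getD (cs : List (List Int)) (h : ∀ s ∈ cs, s.Nodup) (v : Int) :
    (pvIndex cs).getD v []
      = (cs.zipIdx.filter (fun p => p.1.contains v)).map (·.2) := by
  unfold pvIndex
  have h1 : (fun (d : PySem.Dict Int (List Nat)) (p : List Int × Nat) =>
      p.1.foldl (fun d v => d.modify v [] (· ++ [p.2])) d)
      = fun d p => (p.1.map (fun v => (v, p.2))).foldl
          (fun d q => d.modify q.1 [] (· ++ [q.2])) d := by
    funext d p
    rw [List.foldl_map]
  rw [h1]
  have h2 := pv_foldl_foldl_flatMap (xs := cs.zipIdx)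
    (g := fun (p : List Int × Nat) => p.1.map (fun v => (v, p.2)))
    (step := fun (d : PySem.Dict Int (List Nat)) (q : Int × Nat) => d.modify q.1 [] (· ++ [q.2]))
    (d := PySem.Dict.empty)
  simp only at h2
  rw [h2]
  rw [PySem.Dict.getD_foldl_modify_append]
  rw [pv_filter_map_eq_flatMap, pv_filter_map_eq_flatMap]
  rw [List.flatMap_assoc]
  refine List.flatMap_congr (fun p hp => ?_)
  have hnd : p.1.Nodup := h p.1 (List.fst_mem_of_mem_zipIdx hp)
  have : (p.1.map (fun v => (v, p.2))).flatMap
      (fun x => if x.1 == v then [x.2] else [])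
      = p.1.flatMap (fun w => if w == v then [p.2] else []) := by
    rw [List.flatMap_map]
  rw [this, ← pv_filter_map_eq_flatMap (f := fun _ => p.2), pv_filter_beq_nodup _ hnd]
  by_cases hm : v ∈ p.1 <;> simp [hm]
theorem pv_mem_index (cs : List (List Int)) (h : ∀ s ∈ cs, s.Nodup) (v : Int) (x : Nat) :
    x ∈ (pvIndex cs).getD v [] ↔ x < cs.length ∧ v ∈ cs.getD x [] := by
  rw [pv_index_getD cs h v]
  simp only [List.mem_map, List.mem_filter]
  constructor
  · rintro ⟨p, ⟨hp, hc⟩, rfl⟩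
    have := List.mem_zipIdx_iff_getElem?.mp hp
    have hlt : p.2 < cs.length := by
      rcases List.getElem?_eq_some_iff.mp this with ⟨h1, _⟩; exact h1
    refine ⟨hlt, ?_⟩
    rcases List.getElem?_eq_some_iff.mp this with ⟨h1, h2⟩
    rw [List.getD_eq_getElem?_getD, this]
    simpa using hc
  · rintro ⟨hx, hv⟩
    refine ⟨(cs[x], x), ⟨?_, ?_⟩, rfl⟩
    · exact List.mem_zipIdx_iff_getElem?.mpr (by simp [List.getElem?_eq_getElem hx])
    · rw [List.getD_eq_getElem?_getD, List.getElem?_eq_getElem hx] at hv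
      simpa using hv
theorem pv_index_sorted (cs : List (List Int)) (h : ∀ s ∈ cs, s.Nodup) (v : Int) :
    ((pvIndex cs).getD v []).Pairwise (· < ·) := by
  rw [pv_index_getD cs h v]
  have hsub : ((cs.zipIdx.filter (fun p => p.1.contains v)).map (·.2)).Sublist
      (cs.zipIdx.map (·.2)) := List.Sublist.map _ List.filter_sublist
  have hpw : (cs.zipIdx.map (·.2)).Pairwise (· < ·) := by
    have h0 := List.zipIdx_map_snd 0 cs
    have he : ((·.2) : List Int × Nat → Nat) = Prod.snd := rfl
    rw [he, h0]
    exact List.pairwise_lt_range'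
  exact hpw.sublist hsub
theorem pv_index_keys_nodup (cs : List (List Int)) : (pvIndex cs).keys.Nodup := by
  unfold pvIndex
  have h1 : (fun (d : PySem.Dict Int (List Nat)) (p : List Int × Nat) =>
      p.1.foldl (fun d v => d.modify v [] (· ++ [p.2])) d)
      = fun d p => (p.1.map (fun v => (v, p.2))).foldl
          (fun d q => d.modify q.1 [] (· ++ [q.2])) d := by
    funext d p
    rw [List.foldl_map]
  rw [h1]
  have h2 := pv_foldl_foldl_flatMap (xs := cs.zipIdx)
    (g := fun (p : List Int × Nat) => p.1.map (fun v => (v, p.2)))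
    (step := fun (d : PySem.Dict Int (List Nat)) (q : Int × Nat) => d.modify q.1 [] (· ++ [q.2]))
    (d := PySem.Dict.empty)
  simp only at h2
  rw [h2]
  exact PySem.Dict.nodup_keys_foldl_modify_key _ (fun (q : Int × Nat) => q.1) [] (fun _ q => (· ++ [q.2])) PySem.Dict.empty (by simp [PySem.Dict.keys_empty])

theorem pv_mem_values (cs : List (List Int)) (idxs : List Nat)
    (h : idxs ∈ (pvIndex cs).values) :
    ∃ v, (pvIndex cs).getD v [] = idxs := by
  rcases List.mem_map.mp h with ⟨p, hp, rfl⟩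
  refine ⟨p.1, ?_⟩
  have : (p.1, p.2) ∈ (pvIndex cs).items := by simpa using hp
  exact PySem.Dict.getD_of_mem_items _ this (pv_index_keys_nodup cs) []

theorem pv_values_mem (cs : List (List Int)) (v : Int) (x : Nat)
    (hx : x ∈ (pvIndex cs).getD v []) :
    (pvIndex cs).getD v [] ∈ (pvIndex cs).values := by
  cases hc : (pvIndex cs).contains v with
  | false =>
    rw [PySem.Dict.getD_of_not_contains _ [] hc] at hx
    simp at hx
  | true =>
    have hs : ((pvIndex cs).get? v).isSome := by
      rw [← PySem.Dict.contains_eq_isSome_get?, hc]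
    rcases Option.isSome_iff_exists.mp hs with ⟨w, hw⟩
    have hgd := PySem.Dict.getD_of_get?_eq_some (pvIndex cs) [] hw
    rw [hgd]
    exact List.mem_map.mpr ⟨(v, w), PySem.Dict.mem_items_of_get?_eq_some _ hw, rfl⟩

theorem pv_pairs_iff (idxs : List Nat) (h : idxs.Pairwise (· < ·)) (x y : Nat) :
    (∃ a b : Nat, a < b ∧ b < idxs.length ∧ idxs.getD a 0 = x ∧ idxs.getD b 0 = y)
      ↔ (x ∈ idxs ∧ y ∈ idxs ∧ x < y) := by
  rw [List.pairwise_iff_getElem] at h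
  constructor
  · rintro ⟨a, b, hab, hb, rfl, rfl⟩
    have ha : a < idxs.length := lt_trans hab hb
    rw [List.getD_eq_getElem?_getD, List.getElem?_eq_getElem ha,
        List.getD_eq_getElem?_getD, List.getElem?_eq_getElem hb]
    exact ⟨by simp [List.getElem_mem], by simp [List.getElem_mem], by simpa using h a b ha hb hab⟩
  · rintro ⟨hx, hy, hxy⟩
    rcases List.getElem_of_mem hx with ⟨a, ha, rfl⟩
    rcases List.getElem_of_mem hy with ⟨b, hb, rfl⟩
    have hab : a < b := by
      rcases Nat.lt_trichotomy a b with hlt | rfl | hgt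
      · exact hlt
      · omega
      · exact absurd (h b a hb ha hgt) (by omega)
    exact ⟨a, b, hab, hb, by simp [List.getD_eq_getElem?_getD, List.getElem?_eq_getElem ha],
      by simp [List.getD_eq_getElem?_getD, List.getElem?_eq_getElem hb]⟩

theorem pv_mem_PA (cs : List (List Int)) (x y : Nat) :
    (x, y) ∈ pvPA cs
      ↔ x < y ∧ y < cs.length ∧ ∃ v, v ∈ cs.getD x [] ∧ v ∈ cs.getD y [] := by
  simp only [pvPA, List.mem_flatMap, List.mem_map, List.mem_filter, List.mem_range,
    List.mem_range'_1, List.any_eq_true, List.contains_iff_mem]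
  constructor
  · rintro ⟨i, hi, j, ⟨⟨hj1, hj2⟩, hc⟩, he⟩
    have hx : i = x := congrArg Prod.fst he
    have hy : j = y := congrArg Prod.snd he
    subst hx; subst hy
    exact ⟨by omega, by omega, hc⟩
  · rintro ⟨hxy, hyn, hc⟩
    have hxn : x < cs.length := lt_trans hxy hyn
    exact ⟨x, hxn, y, ⟨⟨by omega, by omega⟩, hc⟩, rfl⟩

theorem pv_mem_PB (cs : List (List Int)) (h : ∀ s ∈ cs, s.Nodup) (x y : Nat) :
    (x, y) ∈ pvPB cs
      ↔ x < y ∧ y < cs.length ∧ ∃ v, v ∈ cs.getD x [] ∧ v ∈ cs.getD y [] := by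
  simp only [pvPB, List.mem_flatMap, List.mem_map, List.mem_range, List.mem_range'_1]
  constructor
  · rintro ⟨idxs, hvals, a, ha, b, ⟨hb1, hb2⟩, he⟩
    rcases pv_mem_values cs idxs hvals with ⟨v, hv⟩
    have hsorted := hv ▸ pv_index_sorted cs h v
    have hpair : x ∈ idxs ∧ y ∈ idxs ∧ x < y := by
      refine (pv_pairs_iff idxs hsorted x y).mp ⟨a, b, by omega, by omega, ?_, ?_⟩
      · exact congrArg Prod.fst he
      · exact congrArg Prod.snd he
    obtain ⟨hx, hy, hxy⟩ := hpair
    rw [← hv] at hx hy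
    rcases (pv_mem_index cs h v x).mp hx with ⟨hxn, hvx⟩
    rcases (pv_mem_index cs h v y).mp hy with ⟨hyn, hvy⟩
    exact ⟨hxy, hyn, v, hvx, hvy⟩
  · rintro ⟨hxy, hyn, v, hvx, hvy⟩
    have hxn : x < cs.length := lt_trans hxy hyn
    have hx : x ∈ (pvIndex cs).getD v [] := (pv_mem_index cs h v x).mpr ⟨hxn, hvx⟩
    have hy : y ∈ (pvIndex cs).getD v [] := (pv_mem_index cs h v y).mpr ⟨hyn, hvy⟩
    have hsorted := pv_index_sorted cs h v
    rcases (pv_pairs_iff _ hsorted x y).mpr ⟨hx, hy, hxy⟩ with ⟨a, b, hab, hb, hga, hgb⟩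
    exact ⟨(pvIndex cs).getD v [], pv_values_mem cs v x hx, a, by omega, b, ⟨by omega, by omega⟩,
      by rw [hga, hgb]⟩

theorem pv_any_eq (cs : List (List Int)) (h : ∀ s ∈ cs, s.Nodup) (i j : Nat) :
    (pvPA cs).any (fun p => decide ((p.1 = i ∧ p.2 = j) ∨ (p.1 = j ∧ p.2 = i)))
      = (pvPB cs).any (fun p => decide ((p.1 = i ∧ p.2 = j) ∨ (p.1 = j ∧ p.2 = i))) := by
  have hiff : ∀ x y, (x, y) ∈ pvPA cs ↔ (x, y) ∈ pvPB cs := fun x y =>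
    (pv_mem_PA cs x y).trans (pv_mem_PB cs h x y).symm
  rw [Bool.eq_iff_iff]
  simp only [List.any_eq_true, decide_eq_true_eq]
  constructor <;> rintro ⟨⟨x, y⟩, hp, hcase⟩
  · exact ⟨(x, y), (hiff x y).mp hp, hcase⟩
  · exact ⟨(x, y), (hiff x y).mpr hp, hcase⟩

theorem pv_ent_ext {n : Nat} {mA mB : List (List Bool)} (hA : pvShaped n mA)
    (hB : pvShaped n mB) (h : ∀ i j, i < n → j < n → pvEnt mA i j = pvEnt mB i j) :
    mA = mB := by
  apply List.ext_getElem (by rw [hA.1, hB.1])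
  intro i h1 h2
  have hin : i < n := hA.1 ▸ h1
  have hgA : mA[i] = mA.getD i [] := by
    rw [List.getD_eq_getElem?_getD, List.getElem?_eq_getElem h1]; rfl
  have hgB : mB[i] = mB.getD i [] := by
    rw [List.getD_eq_getElem?_getD, List.getElem?_eq_getElem h2]; rfl
  apply List.ext_getElem (by rw [hgA, hgB, hA.2 i hin, hB.2 i hin])
  intro j hj1 hj2
  have hjn : j < n := by rw [hgA, hA.2 i hin] at hj1; exact hj1
  have heA : mA[i][j] = pvEnt mA i j := by
    rw [pvEnt, ← hgA, List.getD_eq_getElem?_getD, List.getElem?_eq_getElem hj1]; rfl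
  have heB : mB[i][j] = pvEnt mB i j := by
    rw [pvEnt, ← hgB, List.getD_eq_getElem?_getD, List.getElem?_eq_getElem hj2]; rfl
  rw [heA, heB, h i j hin hjn]

-- ===== VERDICT (by name: the statement is the Claim_ definition above) =====
theorem build_omega_graph_spec : Claim_equal_build_omega_graph := by
  intro cs _ hpre
  unfold Spec_build_omega_graph
  rw [pv_A_eq_marks, pv_B_eq_marks]
  have hinit := pv_shaped_init cs.length
  have hbA : ∀ p ∈ pvPA cs, p.1 < cs.length ∧ p.2 < cs.length := by
    rintro ⟨x, y⟩ hp
    rcases (pv_mem_PA cs x y).mp hp with ⟨h1, h2, _⟩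
    exact ⟨by omega, h2⟩
  have hbB : ∀ p ∈ pvPB cs, p.1 < cs.length ∧ p.2 < cs.length := by
    rintro ⟨x, y⟩ hp
    rcases (pv_mem_PB cs hpre x y).mp hp with ⟨h1, h2, _⟩
    exact ⟨by omega, h2⟩
  refine pv_ent_ext (pv_shaped_marks hinit (pvPA cs)) (pv_shaped_marks hinit (pvPB cs))
    (fun i j _ _ => ?_)
  rw [pv_ent_marks hinit (pvPA cs) hbA i j, pv_ent_marks hinit (pvPB cs) hbB i j,
    pv_any_eq cs hpre i j]
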